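-- pv_equiv track=rewrite | github.com/ephillips408/cribbage_repo | scoring.py | find_straights
-- ===== SOURCE A (Python) =====
-- import itertools
--
-- def find_straights(list):
--
--     score = 0
--     found_straight = False
--     no_straights = False
--
--     while found_straight == False or no_straights == False:
--
--         unique_elements = sorted(set(list))
--         # If all of the elements in the set are unique, and the last number is equal to 4 plus the first number, the set is a straight of length 5.
--         if len(unique_elements) == len(list) and unique_elements[-1] == unique_elements[0] + 4:
--             score += 5
--             found_straight = True
--             return score
--
--         # Using the set method removes duplicates in combinations of 4 and 3.
--         four_combs = [ sorted(set(comb)) for comb in itertools.combinations(list, 4) ]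
--         three_combs = [ sorted(set(comb)) for comb in itertools.combinations(list, 3) ]
--
--         for ele in four_combs:
--             if len(ele) != 4: pass
--             elif len(ele) == 4 and ele[-1] != ele[0]+3: pass
--             else: score += 4
--
--         if score != 0:
--             found_straight = True
--             return score
--
--         else:
--
--             for ele in three_combs:
--                 if len(ele) != 3: pass
--                 elif len(ele) == 3 and ele[-1] != ele[0]+2: pass
--                 else: score += 3
--
--             if score != 0:
--                 found_straight = True
--                 return score
--
--             else:
--                 no_straights = True
--                 return score
-- ===== SOURCE B (Python) =====
-- def find_straights(list):
--     counts = {}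
--     for v in list:
--         counts[v] = counts.get(v, 0) + 1
--     # a true straight of five: five distinct consecutive values
--     if len(counts) == len(list) and len(list) == 5 and max(counts) == min(counts) + 4:
--         return 5
--     total = 0
--     for r in counts:
--         if r + 1 in counts and r + 2 in counts and r + 3 in counts:
--             total += 4 * counts[r] * counts[r + 1] * counts[r + 2] * counts[r + 3]
--     if total != 0:
--         return total
--     for r in counts:
--         if r + 1 in counts and r + 2 in counts:
--             total += 3 * counts[r] * counts[r + 1] * counts[r + 2]
--     return total
-- ===== Notes on version B (the rewrite author's own statement) =====
-- stated objective: faster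
-- what changed: Replaces A's enumeration of all 4- and 3-combinations (itertools) with a single rank counter: each run of 4 (resp. 3) consecutive present ranks contributes 4 (resp. 3) times the product of their multiplicities, and the 5-straight check becomes a direct test on the counter.
-- intended difference: On non-empty duplicate-free lists whose max equals min+4 but whose length is not 5 (e.g. [1,3,5]), A's first guard wrongly returns 5 although the cards are not five consecutive ranks; B returns the ordinary run score (0 or 3), which is the intended cribbage value. — e.g. on find_straights([1, 3, 5]): A returns 5, B returns 0
-- outside the precondition, e.g. on find_straights([]): A raises IndexError, B returns 0
import Mathlib
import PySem

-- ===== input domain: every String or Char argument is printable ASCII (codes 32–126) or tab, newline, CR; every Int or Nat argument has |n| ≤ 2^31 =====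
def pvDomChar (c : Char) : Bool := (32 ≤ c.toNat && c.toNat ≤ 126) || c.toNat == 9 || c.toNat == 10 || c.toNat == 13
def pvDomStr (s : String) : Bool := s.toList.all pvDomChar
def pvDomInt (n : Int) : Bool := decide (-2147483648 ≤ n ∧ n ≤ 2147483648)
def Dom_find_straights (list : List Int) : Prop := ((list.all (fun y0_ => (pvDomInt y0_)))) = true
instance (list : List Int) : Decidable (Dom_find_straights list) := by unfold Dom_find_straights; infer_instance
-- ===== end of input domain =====

-- B replaces A's enumeration of all 4-/3-element combinations with a rank counter (asymptotically
-- faster) and checks a real 5-straight; A's buggy 5-guard is documented as an intended difference D_.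

-- ===== PORT A =====

-- itertools.combinations(xs, k), in itertools' order (combinations of positions, order preserved)
def pvCombs : Nat → List Int → List (List Int)
  | 0, _ => [[]]
  | _+1, [] => []
  | k+1, x :: rest => ((pvCombs k rest).map (fun c => x :: c)) ++ pvCombs (k+1) rest

-- sorted(set(c))
def pvSortedSet (c : List Int) : List Int :=
  PySem.List.sorted (PySem.Set.ofList c) (fun x => x) false

-- literal port of A; the while loop body always returns on its first iteration, so it is ported
-- straight-line.  unique[-1]/unique[0] raise IndexError exactly on list = [] (excluded by Pre_);
-- the .getD 0 default is never reached inside Pre_.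
def find_straights (list : List Int) : Int :=
  let unique := pvSortedSet list
  if unique.length = list.length ∧
      (PySem.List.pyGet? unique (-1)).getD 0 = (PySem.List.pyGet? unique 0).getD 0 + 4 then
    5
  else
    let four_combs := (pvCombs 4 list).map pvSortedSet
    let three_combs := (pvCombs 3 list).map pvSortedSet
    let score4 : Int := four_combs.foldl (fun score ele =>
      if ele.length ≠ 4 then score
      else if ele.length = 4 ∧
          (PySem.List.pyGet? ele (-1)).getD 0 ≠ (PySem.List.pyGet? ele 0).getD 0 + 3 then score
      else score + 4) 0
    if score4 ≠ 0 then score4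
    else
      three_combs.foldl (fun score ele =>
        if ele.length ≠ 3 then score
        else if ele.length = 3 ∧
            (PySem.List.pyGet? ele (-1)).getD 0 ≠ (PySem.List.pyGet? ele 0).getD 0 + 2 then score
        else score + 3) score4

-- ===== PORT B =====

-- literal port of Source B: build a rank counter, test a genuine 5-straight, then score runs of 4
-- (resp. 3) as 4 (resp. 3) times the product of the multiplicities of the consecutive ranks.
def find_straights_alt (list : List Int) : Int :=
  let counts := list.foldl (fun d v => d.insert v (d.getD v 0 + 1)) (PySem.Dict.empty : PySem.Dict Int Int)
  if PySem.Dict.size counts = list.length ∧ list.length = 5 ∧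
      (PySem.List.max? counts.keys (fun x => x)).getD 0
        = (PySem.List.min? counts.keys (fun x => x)).getD 0 + 4 then
    5
  else
    let total4 : Int := counts.keys.foldl (fun total r =>
      if (counts.contains (r+1) && counts.contains (r+2) && counts.contains (r+3)) = true then
        total + 4 * counts.getD r 0 * counts.getD (r+1) 0 * counts.getD (r+2) 0 * counts.getD (r+3) 0
      else total) 0
    if total4 ≠ 0 then total4
    else
      counts.keys.foldl (fun total r =>
        if (counts.contains (r+1) && counts.contains (r+2)) = true then
          total + 3 * counts.getD r 0 * counts.getD (r+1) 0 * counts.getD (r+2) 0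
        else total) total4

-- ===== PRECONDITION & SPEC =====

-- Pre_ excludes only the empty list, on which A raises IndexError (unique_elements[-1]).
def Pre_find_straights (list : List Int) : Prop := list ≠ []
instance (list : List Int) : Decidable (Pre_find_straights list) := by
  unfold Pre_find_straights; infer_instance
def pvWitness_find_straights : List Int := [1, 2, 3]

-- On non-empty duplicate-free lists whose max equals min+4 but whose length is not 5 (e.g. [1,3,5]),
-- A's first guard wrongly returns 5 although the cards are not five consecutive ranks; B returns the
-- ordinary run score (0 or 3), which is the intended cribbage value.
def D_find_straights (list : List Int) : Prop :=
  list ≠ [] ∧ list.Nodup ∧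
    PySem.List.max? list (fun x => x) = (PySem.List.min? list (fun x => x)).map (· + 4) ∧
    list.length ≠ 5
instance (list : List Int) : Decidable (D_find_straights list) := by
  unfold D_find_straights; infer_instance

def Spec_find_straights (list : List Int) (out : Int) : Prop :=
  ¬ D_find_straights list → out = find_straights_alt list
instance (list : List Int) (out : Int) : Decidable (Spec_find_straights list out) := by
  unfold Spec_find_straights; infer_instance

def pvDiffWitness_find_straights : List Int := [1, 3, 5]
def pvDiffWitnessOut_find_straights : Int × Int := (5, 0)

-- ===== CLAIM (what is proved, stated in full; the proofs are below) =====

def Claim_unchanged_find_straights : Prop :=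
  ∀ (list : List Int), Dom_find_straights list → Pre_find_straights list →
    Spec_find_straights list (find_straights list)

def Claim_changed_find_straights : Prop :=
  Dom_find_straights (pvDiffWitness_find_straights) ∧
  Pre_find_straights (pvDiffWitness_find_straights) ∧
  D_find_straights (pvDiffWitness_find_straights) ∧
  find_straights (pvDiffWitness_find_straights) = pvDiffWitnessOut_find_straights.1 ∧
  find_straights_alt (pvDiffWitness_find_straights) = pvDiffWitnessOut_find_straights.2 ∧
  pvDiffWitnessOut_find_straights.1 ≠ pvDiffWitnessOut_find_straights.2

def Claim_exact_find_straights : Prop :=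
  ∀ (list : List Int), Dom_find_straights list → Pre_find_straights list →
    D_find_straights list → find_straights list ≠ find_straights_alt list

-- ===== LEMMAS AND PROOFS =====

def pvRun4 (r : Int) : List Int := [r, r+1, r+2, r+3]
def pvRun3 (r : Int) : List Int := [r, r+1, r+2]

lemma pvCombs_sublist : ∀ (k : Nat) (l c : List Int), c ∈ pvCombs k l → c.Sublist l := by
  intro k
  induction k using Nat.strong_induction_on with
  | _ k ihk =>
  intro l
  induction l with
  | nil =>
    intro c hc
    cases k with
    | zero => simp [pvCombs] at hc; simp [hc]
    | succ k' => simp [pvCombs] at hc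
  | cons x xs ihl =>
    intro c hc
    cases k with
    | zero => simp [pvCombs] at hc; simp [hc]
    | succ k' =>
      simp only [pvCombs, List.mem_append, List.mem_map] at hc
      rcases hc with ⟨c', hc', rfl⟩ | hc
      · exact List.Sublist.cons₂ x (List.Sublist.trans (ihk k' (by omega) xs c' hc') (List.Sublist.refl xs))
      · exact List.Sublist.cons x (ihl c hc)

lemma pvCombs_length : ∀ (k : Nat) (l c : List Int), c ∈ pvCombs k l → c.length = k := by
  intro k
  induction k using Nat.strong_induction_on with
  | _ k ihk =>
  intro l
  induction l with
  | nil =>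
    intro c hc
    cases k with
    | zero => simp [pvCombs] at hc; simp [hc]
    | succ k' => simp [pvCombs] at hc
  | cons x xs ihl =>
    intro c hc
    cases k with
    | zero => simp [pvCombs] at hc; simp [hc]
    | succ k' =>
      simp only [pvCombs, List.mem_append, List.mem_map] at hc
      rcases hc with ⟨c', hc', rfl⟩ | hc
      · simp [ihk k' (by omega) xs c' hc']
      · exact ihl c hc

-- the central count: combinations of l that are a permutation of a duplicate-free S are
-- counted by the product of the multiplicities of S's elements in l
lemma pvStar : ∀ (l S : List Int), S.Nodup →
    (pvCombs S.length l).countP (fun c => decide (List.Perm c S))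
      = (S.map (fun v => l.count v)).prod := by
  intro l
  induction l with
  | nil =>
    intro S hnd
    cases S with
    | nil => simp [pvCombs]
    | cons v S' => simp [pvCombs]
  | cons x xs ih =>
    intro S hnd
    cases S with
    | nil => simp [pvCombs]
    | cons v S' =>
      show ((pvCombs S'.length xs).map (fun c => x :: c) ++ pvCombs (S'.length+1) xs).countP _ = _
      rw [List.countP_append, List.countP_map]
      by_cases hx : x ∈ v :: S'
      · have herase := List.perm_cons_erase hx
        have hndE : ((v :: S').erase x).Nodup := hnd.erase x
        have hlenE : ((v :: S').erase x).length = S'.length := by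
          rw [List.length_erase_of_mem hx]; rfl
        have h1 : (pvCombs S'.length xs).countP
              ((fun c => decide (List.Perm c (v :: S'))) ∘ (fun c => x :: c))
            = (pvCombs S'.length xs).countP (fun c => decide (List.Perm c ((v :: S').erase x))) := by
          apply List.countP_congr; intro c _
          simp [Function.comp, List.cons_perm_iff_perm_erase, hx]
        rw [h1]
        have ih1 := ih ((v :: S').erase x) hndE
        rw [hlenE] at ih1
        have ih2 := ih (v :: S') hnd
        simp only [List.length_cons] at ih2
        rw [ih1, ih2]
        -- products: decompose along the permutation v::S' ~ x :: (v::S').erase x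
        have hprod : ∀ f : Int → Nat, ((v :: S').map f).prod = f x * (((v :: S').erase x).map f).prod := by
          intro f
          rw [(herase.map f).prod_eq]
          simp
        have hcnt : ((v :: S').erase x).map (fun v => (x :: xs).count v)
            = ((v :: S').erase x).map (fun v => xs.count v) := by
          apply List.map_congr_left
          intro w hw
          have hwne : w ≠ x := (hnd.mem_erase_iff.mp hw).1
          simp [Ne.symm hwne]
        rw [hprod (fun v => (x :: xs).count v), hprod (fun v => xs.count v), hcnt,
            List.count_cons_self]
        ring
      · have h1 : (pvCombs S'.length xs).countP
              ((fun c => decide (List.Perm c (v :: S'))) ∘ (fun c => x :: c)) = 0 := by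
          apply List.countP_eq_zero.mpr
          intro c _
          simp [Function.comp, List.cons_perm_iff_perm_erase, hx]
        have hcnt : (v :: S').map (fun v => (x :: xs).count v)
            = (v :: S').map (fun v => xs.count v) := by
          apply List.map_congr_left
          intro w hw
          have hwne : w ≠ x := fun e => hx (e ▸ hw)
          simp [Ne.symm hwne]
        have ih2 := ih (v :: S') hnd
        simp only [List.length_cons] at ih2
        rw [h1, ih2, hcnt]
        omega

lemma pvCountSplit (L : List (List Int)) (F : Finset Int) (p : List Int → Prop) [DecidablePred p]
    (q : Int → List Int → Prop) [∀ r c, Decidable (q r c)]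
    (hiff : ∀ c ∈ L, (p c ↔ ∃ r ∈ F, q r c))
    (huni : ∀ c r r', r ∈ F → r' ∈ F → q r c → q r' c → r = r') :
    L.countP (fun c => decide (p c)) = ∑ r ∈ F, L.countP (fun c => decide (q r c)) := by
  induction L with
  | nil => simp
  | cons c L ihL =>
    have hrec := ihL (fun c hc => hiff c (List.mem_cons_of_mem _ hc))
    simp only [List.countP_cons]
    rw [Finset.sum_add_distrib, ← hrec]
    congr 1
    by_cases hp : p c
    · obtain ⟨r0, hr0F, hq0⟩ := (hiff c (List.mem_cons_self)).mp hp
      have hterm : ∀ r ∈ F, (if decide (q r c) = true then 1 else 0) = if r = r0 then 1 else 0 := by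
        intro r hr
        by_cases hq : q r c
        · have he := huni c r r0 hr hr0F hq hq0
          simp [he, hq0]
        · simp only [hq, decide_false, Bool.false_eq_true, if_false]
          have : r ≠ r0 := fun e => hq (e ▸ hq0)
          simp [this]
      rw [Finset.sum_congr rfl hterm]
      simp [hp, Finset.sum_ite_eq' F r0 (fun _ => 1), hr0F]
    · have hnone : ∀ r ∈ F, ¬ q r c := fun r hr hq => hp ((hiff c (List.mem_cons_self)).mpr ⟨r, hr, hq⟩)
      have hterm : ∀ r ∈ F, (if decide (q r c) = true then 1 else 0) = 0 := by
        intro r hr; simp [hnone r hr]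
      rw [Finset.sum_congr rfl hterm]
      simp [hp]



lemma pv_nodup_of_card (l : List Int) (h : l.toFinset.card = l.length) : l.Nodup := by
  rw [← List.dedup_eq_self]
  have h2 : l.dedup.length = l.length := by
    have hd : l.dedup.toFinset = l.toFinset := by ext x; simp
    rw [← List.toFinset_card_of_nodup (List.nodup_dedup l), hd, h]
  exact List.Sublist.eq_of_length (List.dedup_sublist l) h2

lemma pv_perm_ofList (c : List Int) (h : c.Nodup) : List.Perm c (PySem.Set.ofList c) := by
  refine (List.perm_ext_iff_of_nodup h (PySem.Set.nodup_ofList c)).mpr ?_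
  intro x
  simp [PySem.Set.mem_ofList]

lemma pvOfListLen_iff (l : List Int) : (PySem.Set.ofList l).length = l.length ↔ l.Nodup := by
  constructor
  · intro h
    apply pv_nodup_of_card
    have h1 : (PySem.Set.ofList l).toFinset = l.toFinset := by
      ext x; simp [PySem.Set.mem_ofList]
    rw [← h1, List.toFinset_card_of_nodup (PySem.Set.nodup_ofList l), h]
  · intro h
    exact (pv_perm_ofList l h).length_eq.symm

lemma pvCond4_iff (c : List Int) (hlen : c.length = 4) :
    ((pvSortedSet c).length = 4 ∧
      (PySem.List.pyGet? (pvSortedSet c) (-1)).getD 0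
        = (PySem.List.pyGet? (pvSortedSet c) 0).getD 0 + 3)
    ↔ ∃ r, List.Perm c (pvRun4 r) := by
  constructor
  · rintro ⟨h4, hgap⟩
    have hperm : List.Perm (pvSortedSet c) (PySem.Set.ofList c) := PySem.List.sorted_perm _ _ _
    have hofl : (PySem.Set.ofList c).length = c.length := by
      rw [← hperm.length_eq, h4, hlen]
    have hnd : c.Nodup := (pvOfListLen_iff c).mp hofl
    have hpc : List.Perm c (pvSortedSet c) := (pv_perm_ofList c hnd).trans hperm.symm
    have hlt : (pvSortedSet c).Pairwise (· < ·) := PySem.List.sorted_ofList_pairwise_lt c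
    obtain ⟨a, b, c2, d, hu⟩ := List.length_eq_four.mp h4
    rw [hu] at hgap hpc hlt
    have hda : d = a + 3 := hgap
    have hab : a < b := List.rel_of_pairwise_cons hlt (by simp)
    have hbc : b < c2 := List.rel_of_pairwise_cons hlt.of_cons (by simp)
    have hcd : c2 < d := List.rel_of_pairwise_cons hlt.of_cons.of_cons (by simp)
    have hb : b = a + 1 := by omega
    have hc2 : c2 = a + 2 := by omega
    refine ⟨a, ?_⟩
    rw [pvRun4]
    rw [hb, hc2, hda] at hpc
    exact hpc
  · rintro ⟨r, hp⟩
    have hndr : (pvRun4 r).Nodup := by simp [pvRun4]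
    have hndc : c.Nodup := (hp.nodup_iff).mpr hndr
    have hperm2 : List.Perm (pvRun4 r) (PySem.Set.ofList c) :=
      hp.symm.trans (pv_perm_ofList c hndc)
    have hltr : (pvRun4 r).Pairwise (fun a b => (fun x : Int => x) a < (fun x : Int => x) b) := by
      unfold pvRun4
      refine List.Pairwise.cons ?_ (List.Pairwise.cons ?_ (List.Pairwise.cons ?_ (List.pairwise_singleton _ _))) <;>
        (intro y hy; simp at hy; rcases hy with rfl | rfl | rfl <;> norm_num)
    have hu : pvSortedSet c = pvRun4 r :=
      PySem.List.sorted_eq_of_perm_of_pairwise_lt _ _ _ hperm2 hltr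
    rw [hu]
    exact ⟨rfl, rfl⟩

lemma pvCond3_iff (c : List Int) (hlen : c.length = 3) :
    ((pvSortedSet c).length = 3 ∧
      (PySem.List.pyGet? (pvSortedSet c) (-1)).getD 0
        = (PySem.List.pyGet? (pvSortedSet c) 0).getD 0 + 2)
    ↔ ∃ r, List.Perm c (pvRun3 r) := by
  constructor
  · rintro ⟨h3, hgap⟩
    have hperm : List.Perm (pvSortedSet c) (PySem.Set.ofList c) := PySem.List.sorted_perm _ _ _
    have hofl : (PySem.Set.ofList c).length = c.length := by
      rw [← hperm.length_eq, h3, hlen]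
    have hnd : c.Nodup := (pvOfListLen_iff c).mp hofl
    have hpc : List.Perm c (pvSortedSet c) := (pv_perm_ofList c hnd).trans hperm.symm
    have hlt : (pvSortedSet c).Pairwise (· < ·) := PySem.List.sorted_ofList_pairwise_lt c
    obtain ⟨a, b, c2, hu⟩ := List.length_eq_three.mp h3
    rw [hu] at hgap hpc hlt
    have hda : c2 = a + 2 := hgap
    have hab : a < b := List.rel_of_pairwise_cons hlt (by simp)
    have hbc : b < c2 := List.rel_of_pairwise_cons hlt.of_cons (by simp)
    have hb : b = a + 1 := by omega
    refine ⟨a, ?_⟩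
    rw [pvRun3]
    rw [hb, hda] at hpc
    exact hpc
  · rintro ⟨r, hp⟩
    have hndr : (pvRun3 r).Nodup := by simp [pvRun3]
    have hndc : c.Nodup := (hp.nodup_iff).mpr hndr
    have hperm2 : List.Perm (pvRun3 r) (PySem.Set.ofList c) :=
      hp.symm.trans (pv_perm_ofList c hndc)
    have hltr : (pvRun3 r).Pairwise (fun a b => (fun x : Int => x) a < (fun x : Int => x) b) := by
      unfold pvRun3
      refine List.Pairwise.cons ?_ (List.Pairwise.cons ?_ (List.pairwise_singleton _ _)) <;>
        (intro y hy; simp at hy; rcases hy with rfl | rfl <;> norm_num)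
    have hu : pvSortedSet c = pvRun3 r :=
      PySem.List.sorted_eq_of_perm_of_pairwise_lt _ _ _ hperm2 hltr
    rw [hu]
    exact ⟨rfl, rfl⟩

lemma pvSumIte (n : Int) (p : List Int → Prop) [DecidablePred p] (L : List (List Int)) :
    (L.map (fun c => if p c then n else 0)).sum = n * (L.countP (fun c => decide (p c)) : Int) := by
  induction L with
  | nil => simp
  | cons c L ih =>
    simp only [List.map_cons, List.sum_cons, List.countP_cons, ih]
    by_cases h : p c <;> simp [h] <;> ring

lemma pvRun4_nodup (r : Int) : (pvRun4 r).Nodup := by simp [pvRun4]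
lemma pvRun3_nodup (r : Int) : (pvRun3 r).Nodup := by simp [pvRun3]

-- the count of 4-run combinations at a given least rank, as a product of multiplicities
lemma pvStar4 (l : List Int) (r : Int) :
    ((pvCombs 4 l).countP (fun c => decide (List.Perm c (pvRun4 r))) : Int)
      = (((pvRun4 r).map (fun v => l.count v)).prod : Int) := by
  exact_mod_cast congrArg (Nat.cast (R := Int)) (pvStar l (pvRun4 r) (pvRun4_nodup r))

lemma pvStar3 (l : List Int) (r : Int) :
    ((pvCombs 3 l).countP (fun c => decide (List.Perm c (pvRun3 r))) : Int)
      = (((pvRun3 r).map (fun v => l.count v)).prod : Int) := by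
  exact_mod_cast congrArg (Nat.cast (R := Int)) (pvStar l (pvRun3 r) (pvRun3_nodup r))

lemma pvUni4 (c : List Int) (r r' : Int)
    (h : List.Perm c (pvRun4 r)) (h' : List.Perm c (pvRun4 r')) : r = r' := by
  have h1 : r ∈ pvRun4 r' := (h.symm.trans h').mem_iff.mp (by simp [pvRun4])
  have h2 : r' ∈ pvRun4 r := (h'.symm.trans h).mem_iff.mp (by simp [pvRun4])
  simp [pvRun4] at h1 h2
  omega

lemma pvUni3 (c : List Int) (r r' : Int)
    (h : List.Perm c (pvRun3 r)) (h' : List.Perm c (pvRun3 r')) : r = r' := by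
  have h1 : r ∈ pvRun3 r' := (h.symm.trans h').mem_iff.mp (by simp [pvRun3])
  have h2 : r' ∈ pvRun3 r := (h'.symm.trans h).mem_iff.mp (by simp [pvRun3])
  simp [pvRun3] at h1 h2
  omega

-- A's 4-score fold, in closed form
lemma pvScore4 (l : List Int) (a : Int) :
    ((pvCombs 4 l).map pvSortedSet).foldl (fun score ele =>
      if ele.length ≠ 4 then score
      else if ele.length = 4 ∧
          (PySem.List.pyGet? ele (-1)).getD 0 ≠ (PySem.List.pyGet? ele 0).getD 0 + 3 then score
      else score + 4) a
    = a + 4 * ∑ r ∈ l.toFinset, (((pvRun4 r).map (fun v => l.count v)).prod : Int) := by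
  rw [List.foldl_map]
  have hif : ∀ (s : Int) (len : Nat) (xv yv : Int),
      (if len ≠ 4 then s else if len = 4 ∧ xv ≠ yv + 3 then s else s + 4)
      = s + (if (len = 4 ∧ xv = yv + 3) then 4 else 0) := by
    intro s len xv yv
    by_cases h1 : len = 4 <;> by_cases h2 : xv = yv + 3 <;> simp [h1, h2]
  have hfun : (fun (score : Int) (c : List Int) =>
      if (pvSortedSet c).length ≠ 4 then score
      else if (pvSortedSet c).length = 4 ∧
          (PySem.List.pyGet? (pvSortedSet c) (-1)).getD 0 ≠ (PySem.List.pyGet? (pvSortedSet c) 0).getD 0 + 3 then score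
      else score + 4)
      = fun score c => score + (if ((pvSortedSet c).length = 4 ∧
          (PySem.List.pyGet? (pvSortedSet c) (-1)).getD 0 = (PySem.List.pyGet? (pvSortedSet c) 0).getD 0 + 3) then 4 else 0) := by
    funext s c
    exact hif s _ _ _
  rw [hfun, PySem.List.foldl_add]
  congr 1
  rw [pvSumIte]
  have hiff : ∀ c ∈ pvCombs 4 l, (((pvSortedSet c).length = 4 ∧
      (PySem.List.pyGet? (pvSortedSet c) (-1)).getD 0 = (PySem.List.pyGet? (pvSortedSet c) 0).getD 0 + 3)
      ↔ ∃ r ∈ l.toFinset, List.Perm c (pvRun4 r)) := by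
    intro c hc
    rw [pvCond4_iff c (pvCombs_length 4 l c hc)]
    constructor
    · rintro ⟨r, hp⟩
      refine ⟨r, ?_, hp⟩
      have hrc : r ∈ c := hp.mem_iff.mpr (by simp [pvRun4])
      exact List.mem_toFinset.mpr ((pvCombs_sublist 4 l c hc).mem hrc)
    · rintro ⟨r, _, hp⟩
      exact ⟨r, hp⟩
  have huni : ∀ (c : List Int) (r r' : Int), r ∈ l.toFinset → r' ∈ l.toFinset →
      List.Perm c (pvRun4 r) → List.Perm c (pvRun4 r') → r = r' :=
    fun c r r' _ _ h h' => pvUni4 c r r' h h'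
  rw [pvCountSplit (pvCombs 4 l) l.toFinset _ _ hiff huni, Nat.cast_sum]
  congr 1
  exact Finset.sum_congr rfl (fun r _ => pvStar4 l r)

lemma pvScore3 (l : List Int) (a : Int) :
    ((pvCombs 3 l).map pvSortedSet).foldl (fun score ele =>
      if ele.length ≠ 3 then score
      else if ele.length = 3 ∧
          (PySem.List.pyGet? ele (-1)).getD 0 ≠ (PySem.List.pyGet? ele 0).getD 0 + 2 then score
      else score + 3) a
    = a + 3 * ∑ r ∈ l.toFinset, (((pvRun3 r).map (fun v => l.count v)).prod : Int) := by
  rw [List.foldl_map]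
  have hif : ∀ (s : Int) (len : Nat) (xv yv : Int),
      (if len ≠ 3 then s else if len = 3 ∧ xv ≠ yv + 2 then s else s + 3)
      = s + (if (len = 3 ∧ xv = yv + 2) then 3 else 0) := by
    intro s len xv yv
    by_cases h1 : len = 3 <;> by_cases h2 : xv = yv + 2 <;> simp [h1, h2]
  have hfun : (fun (score : Int) (c : List Int) =>
      if (pvSortedSet c).length ≠ 3 then score
      else if (pvSortedSet c).length = 3 ∧
          (PySem.List.pyGet? (pvSortedSet c) (-1)).getD 0 ≠ (PySem.List.pyGet? (pvSortedSet c) 0).getD 0 + 2 then score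
      else score + 3)
      = fun score c => score + (if ((pvSortedSet c).length = 3 ∧
          (PySem.List.pyGet? (pvSortedSet c) (-1)).getD 0 = (PySem.List.pyGet? (pvSortedSet c) 0).getD 0 + 2) then 3 else 0) := by
    funext s c
    exact hif s _ _ _
  rw [hfun, PySem.List.foldl_add]
  congr 1
  rw [pvSumIte]
  have hiff : ∀ c ∈ pvCombs 3 l, (((pvSortedSet c).length = 3 ∧
      (PySem.List.pyGet? (pvSortedSet c) (-1)).getD 0 = (PySem.List.pyGet? (pvSortedSet c) 0).getD 0 + 2)
      ↔ ∃ r ∈ l.toFinset, List.Perm c (pvRun3 r)) := by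
    intro c hc
    rw [pvCond3_iff c (pvCombs_length 3 l c hc)]
    constructor
    · rintro ⟨r, hp⟩
      refine ⟨r, ?_, hp⟩
      have hrc : r ∈ c := hp.mem_iff.mpr (by simp [pvRun3])
      exact List.mem_toFinset.mpr ((pvCombs_sublist 3 l c hc).mem hrc)
    · rintro ⟨r, _, hp⟩
      exact ⟨r, hp⟩
  have huni : ∀ (c : List Int) (r r' : Int), r ∈ l.toFinset → r' ∈ l.toFinset →
      List.Perm c (pvRun3 r) → List.Perm c (pvRun3 r') → r = r' :=
    fun c r r' _ _ h h' => pvUni3 c r r' h h'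
  rw [pvCountSplit (pvCombs 3 l) l.toFinset _ _ hiff huni, Nat.cast_sum]
  congr 1
  exact Finset.sum_congr rfl (fun r _ => pvStar3 l r)

-- B's counter is PySem.Dict.counter (d[v] = d.get(v,0)+1 is d.modify v 0 (·+1))
lemma pvCounts_eq (l : List Int) :
    l.foldl (fun d v => d.insert v (d.getD v 0 + 1)) (PySem.Dict.empty : PySem.Dict Int Int)
      = PySem.Dict.counter l := rfl

lemma pvTotal4 (l : List Int) (a : Int) :
    (PySem.Dict.counter l).keys.foldl (fun total r =>
      if ((PySem.Dict.counter l).contains (r+1) && (PySem.Dict.counter l).contains (r+2)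
            && (PySem.Dict.counter l).contains (r+3)) = true then
        total + 4 * (PySem.Dict.counter l).getD r 0 * (PySem.Dict.counter l).getD (r+1) 0
          * (PySem.Dict.counter l).getD (r+2) 0 * (PySem.Dict.counter l).getD (r+3) 0
      else total) a
    = a + 4 * ∑ r ∈ l.toFinset, (((pvRun4 r).map (fun v => l.count v)).prod : Int) := by
  simp only [PySem.Dict.keys_counter, PySem.Dict.contains_counter, PySem.Dict.getD_counter]
  have hfun : (fun (total r : Int) =>
      if (l.contains (r+1) && l.contains (r+2) && l.contains (r+3)) = true then
        total + 4 * (l.count r : Int) * l.count (r+1) * l.count (r+2) * l.count (r+3)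
      else total)
      = fun total r => total + (if (l.contains (r+1) && l.contains (r+2) && l.contains (r+3)) = true then
        4 * (l.count r : Int) * l.count (r+1) * l.count (r+2) * l.count (r+3) else 0) := by
    funext t r
    split_ifs <;> simp
  rw [hfun, PySem.List.foldl_add]
  congr 1
  have hmap : (PySem.Set.ofList l).map (fun r =>
      if (l.contains (r+1) && l.contains (r+2) && l.contains (r+3)) = true then
        4 * (l.count r : Int) * l.count (r+1) * l.count (r+2) * l.count (r+3) else 0)
      = (PySem.Set.ofList l).map (fun r => 4 * (((pvRun4 r).map (fun v => l.count v)).prod : Int)) := by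
    apply List.map_congr_left
    intro r _
    by_cases hmem : (r+1) ∈ l ∧ (r+2) ∈ l ∧ (r+3) ∈ l
    · have hb : (l.contains (r+1) && l.contains (r+2) && l.contains (r+3)) = true := by
        simp [hmem.1, hmem.2.1, hmem.2.2]
      rw [if_pos hb]
      simp only [pvRun4, List.map_cons, List.map_nil, List.prod_cons, List.prod_nil]
      push_cast
      ring
    · have hb : ¬ ((l.contains (r+1) && l.contains (r+2) && l.contains (r+3)) = true) := by
        simp only [Bool.and_eq_true, List.contains_iff_mem]
        intro hcon
        exact hmem ⟨hcon.1.1, hcon.1.2, hcon.2⟩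
      rw [if_neg hb]
      have h0 : l.count (r+1) = 0 ∨ l.count (r+2) = 0 ∨ l.count (r+3) = 0 := by
        by_contra hc
        push Not at hc
        apply hmem
        refine ⟨?_, ?_, ?_⟩ <;> rw [← List.count_pos_iff] <;> omega
      have hz : ((pvRun4 r).map (fun v => l.count v)).prod = 0 := by
        simp only [pvRun4, List.map_cons, List.map_nil, List.prod_cons, List.prod_nil]
        rcases h0 with h0 | h0 | h0 <;> simp [h0]
      simp [hz]
  rw [hmap, ← List.sum_toFinset _ (PySem.Set.nodup_ofList l)]
  have htf : (PySem.Set.ofList l).toFinset = l.toFinset := by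
    ext x; simp [PySem.Set.mem_ofList]
  rw [htf, Finset.mul_sum]

lemma pvTotal3 (l : List Int) (a : Int) :
    (PySem.Dict.counter l).keys.foldl (fun total r =>
      if ((PySem.Dict.counter l).contains (r+1) && (PySem.Dict.counter l).contains (r+2)) = true then
        total + 3 * (PySem.Dict.counter l).getD r 0 * (PySem.Dict.counter l).getD (r+1) 0
          * (PySem.Dict.counter l).getD (r+2) 0
      else total) a
    = a + 3 * ∑ r ∈ l.toFinset, (((pvRun3 r).map (fun v => l.count v)).prod : Int) := by
  simp only [PySem.Dict.keys_counter, PySem.Dict.contains_counter, PySem.Dict.getD_counter]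
  have hfun : (fun (total r : Int) =>
      if (l.contains (r+1) && l.contains (r+2)) = true then
        total + 3 * (l.count r : Int) * l.count (r+1) * l.count (r+2)
      else total)
      = fun total r => total + (if (l.contains (r+1) && l.contains (r+2)) = true then
        3 * (l.count r : Int) * l.count (r+1) * l.count (r+2) else 0) := by
    funext t r
    split_ifs <;> simp
  rw [hfun, PySem.List.foldl_add]
  congr 1
  have hmap : (PySem.Set.ofList l).map (fun r =>
      if (l.contains (r+1) && l.contains (r+2)) = true then
        3 * (l.count r : Int) * l.count (r+1) * l.count (r+2) else 0)
      = (PySem.Set.ofList l).map (fun r => 3 * (((pvRun3 r).map (fun v => l.count v)).prod : Int)) := by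
    apply List.map_congr_left
    intro r _
    by_cases hmem : (r+1) ∈ l ∧ (r+2) ∈ l
    · have hb : (l.contains (r+1) && l.contains (r+2)) = true := by
        simp [hmem.1, hmem.2]
      rw [if_pos hb]
      simp only [pvRun3, List.map_cons, List.map_nil, List.prod_cons, List.prod_nil]
      push_cast
      ring
    · have hb : ¬ ((l.contains (r+1) && l.contains (r+2)) = true) := by
        simp only [Bool.and_eq_true, List.contains_iff_mem]
        intro hcon
        exact hmem ⟨hcon.1, hcon.2⟩
      rw [if_neg hb]
      have h0 : l.count (r+1) = 0 ∨ l.count (r+2) = 0 := by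
        by_contra hc
        push Not at hc
        apply hmem
        refine ⟨?_, ?_⟩ <;> rw [← List.count_pos_iff] <;> omega
      have hz : ((pvRun3 r).map (fun v => l.count v)).prod = 0 := by
        simp only [pvRun3, List.map_cons, List.map_nil, List.prod_cons, List.prod_nil]
        rcases h0 with h0 | h0 <;> simp [h0]
      simp [hz]
  rw [hmap, ← List.sum_toFinset _ (PySem.Set.nodup_ofList l)]
  have htf : (PySem.Set.ofList l).toFinset = l.toFinset := by
    ext x; simp [PySem.Set.mem_ofList]
  rw [htf, Finset.mul_sum]

lemma pv_le_getLast (l : List Int) (h : l.Pairwise (· ≤ ·)) (x : Int) (hx : x ∈ l)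
    (hne : l ≠ []) : x ≤ l.getLast hne := by
  induction l with
  | nil => simp at hx
  | cons a t ih =>
    rcases List.mem_cons.mp hx with rfl | hx'
    · cases t with
      | nil => simp
      | cons b t' =>
        rw [List.getLast_cons (by simp : (b :: t') ≠ [])]
        exact List.rel_of_pairwise_cons h (List.getLast_mem _)
    · have hne' : t ≠ [] := by intro e; subst e; simp at hx'
      rw [List.getLast_cons hne']
      exact ih h.of_cons hx' hne'

lemma pv_max_ofList (l : List Int) :
    PySem.List.max? (PySem.Set.ofList l) (fun x => x) = PySem.List.max? l (fun x => x) := by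
  rcases hm : PySem.List.max? l (fun x => x) with _ | m
  · have : l = [] := (PySem.List.max?_eq_none_iff _ _).mp hm
    subst this
    rfl
  · rcases hm2 : PySem.List.max? (PySem.Set.ofList l) (fun x => x) with _ | m2
    · have : PySem.Set.ofList l = [] := (PySem.List.max?_eq_none_iff _ _).mp hm2
      have hml : m ∈ l := PySem.List.max?_mem hm
      have : m ∈ PySem.Set.ofList l := (PySem.Set.mem_ofList _ _).mpr hml
      simp [‹PySem.Set.ofList l = []›] at this
    · have h1 : m2 ≤ m := PySem.List.max?_isMax hm m2
        ((PySem.Set.mem_ofList _ _).mp (PySem.List.max?_mem hm2))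
      have h2 : m ≤ m2 := PySem.List.max?_isMax hm2 m
        ((PySem.Set.mem_ofList _ _).mpr (PySem.List.max?_mem hm))
      rw [le_antisymm h1 h2]

lemma pv_min_ofList (l : List Int) :
    PySem.List.min? (PySem.Set.ofList l) (fun x => x) = PySem.List.min? l (fun x => x) := by
  rcases hm : PySem.List.min? l (fun x => x) with _ | m
  · have : l = [] := (PySem.List.min?_eq_none_iff _ _).mp hm
    subst this
    rfl
  · rcases hm2 : PySem.List.min? (PySem.Set.ofList l) (fun x => x) with _ | m2
    · have : PySem.Set.ofList l = [] := (PySem.List.min?_eq_none_iff _ _).mp hm2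
      have hml : m ∈ l := PySem.List.min?_mem hm
      have : m ∈ PySem.Set.ofList l := (PySem.Set.mem_ofList _ _).mpr hml
      simp [‹PySem.Set.ofList l = []›] at this
    · have h1 : m ≤ m2 := PySem.List.min?_isMin hm m2
        ((PySem.Set.mem_ofList _ _).mp (PySem.List.min?_mem hm2))
      have h2 : m2 ≤ m := PySem.List.min?_isMin hm2 m
        ((PySem.Set.mem_ofList _ _).mpr (PySem.List.min?_mem hm))
      rw [le_antisymm h1 h2]

-- the ends of sorted(set(l)) are min and max of l
lemma pv_sorted_ends (l : List Int) (h : l ≠ []) :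
    ∃ mn mx, PySem.List.min? l (fun x => x) = some mn ∧ PySem.List.max? l (fun x => x) = some mx ∧
      (PySem.List.pyGet? (pvSortedSet l) 0).getD 0 = mn ∧
      (PySem.List.pyGet? (pvSortedSet l) (-1)).getD 0 = mx := by
  have hune : pvSortedSet l ≠ [] := by
    intro e
    have h2 := (PySem.List.sorted_eq_nil_iff (PySem.Set.ofList l) (fun x : Int => x) false).mp e
    rcases l with _ | ⟨x, xs⟩
    · exact h rfl
    · exact absurd ((PySem.Set.mem_ofList _ _).mpr List.mem_cons_self) (by rw [h2]; simp)
  obtain ⟨h0, t0, hut⟩ := List.exists_cons_of_ne_nil hune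
  have hlt : (pvSortedSet l).Pairwise (· < ·) := PySem.List.sorted_ofList_pairwise_lt l
  have hle : (pvSortedSet l).Pairwise (· ≤ ·) := hlt.imp le_of_lt
  have hmemu : ∀ x, x ∈ pvSortedSet l ↔ x ∈ l := by
    intro x
    rw [pvSortedSet, PySem.List.mem_sorted]
    exact PySem.Set.mem_ofList _ _
  -- the max
  rcases hm : PySem.List.max? l (fun x => x) with _ | m
  · exact absurd ((PySem.List.max?_eq_none_iff _ _).mp hm) h
  rcases hn : PySem.List.min? l (fun x => x) with _ | n
  · exact absurd ((PySem.List.min?_eq_none_iff _ _).mp hn) h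
  refine ⟨n, m, rfl, rfl, ?_, ?_⟩
  · -- head is the min
    have hhead : ∀ y ∈ PySem.Set.ofList l, h0 ≤ y :=
      PySem.List.key_head_sorted_le (xs := PySem.Set.ofList l) (key := fun x => x) hut
    have h1 : h0 ≤ n := hhead n ((PySem.Set.mem_ofList _ _).mpr (PySem.List.min?_mem hn))
    have h2 : n ≤ h0 := PySem.List.min?_isMin hn h0
      ((hmemu h0).mp (by rw [hut]; exact List.mem_cons_self))
    have hg : (PySem.List.pyGet? (pvSortedSet l) 0).getD 0 = h0 := by
      rw [hut]
      have hq := PySem.List.pyGet?_natCast (h0 :: t0) 0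
      simp only [Nat.cast_zero] at hq
      rw [hq]
      simp
    rw [hg]
    exact (le_antisymm h1 h2)
  · -- last is the max
    have hlast : (PySem.List.pyGet? (pvSortedSet l) (-1)).getD 0 = (pvSortedSet l).getLast hune := by
      rw [PySem.List.pyGet?_neg_one, List.getLast?_eq_some_getLast hune]
      rfl
    rw [hlast]
    have h1 : (pvSortedSet l).getLast hune ≤ m := PySem.List.max?_isMax hm _
      ((hmemu _).mp (List.getLast_mem hune))
    have h2 : m ≤ (pvSortedSet l).getLast hune := pv_le_getLast _ hle m
      ((hmemu m).mpr (PySem.List.max?_mem hm)) hune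
    exact le_antisymm h1 h2

-- A's guard, characterised by max?/min? of the input
lemma pvGuardA_iff (l : List Int) (h : l ≠ []) :
    ((pvSortedSet l).length = l.length ∧
      (PySem.List.pyGet? (pvSortedSet l) (-1)).getD 0
        = (PySem.List.pyGet? (pvSortedSet l) 0).getD 0 + 4)
    ↔ (l.Nodup ∧
        PySem.List.max? l (fun x => x) = (PySem.List.min? l (fun x => x)).map (· + 4)) := by
  obtain ⟨mn, mx, hmn, hmx, hget0, hget1⟩ := pv_sorted_ends l h
  have hlen : (pvSortedSet l).length = (PySem.Set.ofList l).length :=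
    PySem.List.length_sorted _ _ _
  constructor
  · rintro ⟨h1, h2⟩
    refine ⟨(pvOfListLen_iff l).mp (hlen ▸ h1), ?_⟩
    rw [hmn, hmx, Option.map_some]
    rw [hget0, hget1] at h2
    rw [h2]
  · rintro ⟨h1, h2⟩
    refine ⟨hlen.trans ((pvOfListLen_iff l).mpr h1), ?_⟩
    rw [hmn, hmx, Option.map_some, Option.some_inj] at h2
    rw [hget0, hget1, h2]

-- B's guard
lemma pvGuardB_iff (l : List Int) (h : l ≠ []) :
    (PySem.Dict.size (PySem.Dict.counter l) = l.length ∧ l.length = 5 ∧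
      (PySem.List.max? (PySem.Dict.counter l).keys (fun x => x)).getD 0
        = (PySem.List.min? (PySem.Dict.counter l).keys (fun x => x)).getD 0 + 4)
    ↔ (l.Nodup ∧ l.length = 5 ∧
        PySem.List.max? l (fun x => x) = (PySem.List.min? l (fun x => x)).map (· + 4)) := by
  obtain ⟨mn, mx, hmn, hmx, _, _⟩ := pv_sorted_ends l h
  have hsize : PySem.Dict.size (PySem.Dict.counter l) = (PySem.Set.ofList l).length := by
    rw [← PySem.Dict.keys_counter l]
    simp [PySem.Dict.keys, PySem.Dict.size]
  have hmaxk : PySem.List.max? (PySem.Dict.counter l).keys (fun x => x) = some mx := by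
    rw [PySem.Dict.keys_counter l, pv_max_ofList l, hmx]
  have hmink : PySem.List.min? (PySem.Dict.counter l).keys (fun x => x) = some mn := by
    rw [PySem.Dict.keys_counter l, pv_min_ofList l, hmn]
  rw [hsize, hmaxk, hmink, hmx, hmn]
  simp only [Option.getD_some, Option.map_some, Option.some_inj]
  rw [pvOfListLen_iff l]

-- ===== VERDICT (by name: the statement is the Claim_ definition above) =====

theorem find_straights_spec : Claim_unchanged_find_straights := by
  intro l _ hpre hnd
  show find_straights l = find_straights_alt l
  simp only [find_straights, find_straights_alt, pvCounts_eq]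
  by_cases hg : l.Nodup ∧
      PySem.List.max? l (fun x => x) = (PySem.List.min? l (fun x => x)).map (· + 4)
  · have h5 : l.length = 5 := by
      by_contra hne5
      exact hnd ⟨hpre, hg.1, hg.2, hne5⟩
    rw [if_pos ((pvGuardA_iff l hpre).mpr hg),
        if_pos ((pvGuardB_iff l hpre).mpr ⟨hg.1, h5, hg.2⟩)]
  · have hAg : ¬ ((pvSortedSet l).length = l.length ∧
        (PySem.List.pyGet? (pvSortedSet l) (-1)).getD 0
          = (PySem.List.pyGet? (pvSortedSet l) 0).getD 0 + 4) :=
      fun hA => hg ((pvGuardA_iff l hpre).mp hA)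
    have hBg : ¬ (PySem.Dict.size (PySem.Dict.counter l) = l.length ∧ l.length = 5 ∧
        (PySem.List.max? (PySem.Dict.counter l).keys (fun x => x)).getD 0
          = (PySem.List.min? (PySem.Dict.counter l).keys (fun x => x)).getD 0 + 4) := fun hB => by
      obtain ⟨h1, _, h3⟩ := (pvGuardB_iff l hpre).mp hB
      exact hg ⟨h1, h3⟩
    rw [if_neg hAg, if_neg hBg, pvScore4 l 0, pvTotal4 l 0, pvScore3 l, pvTotal3 l]

theorem find_straights_changed : Claim_changed_find_straights := by
  unfold Claim_changed_find_straights; decide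

theorem find_straights_tight : Claim_exact_find_straights := by
  intro l _ hpre hD
  obtain ⟨hne, hnd, hmm, hlen5⟩ := hD
  have hA : find_straights l = 5 := by
    simp only [find_straights]
    rw [if_pos ((pvGuardA_iff l hne).mpr ⟨hnd, hmm⟩)]
  have hB : find_straights_alt l ≠ 5 := by
    simp only [find_straights_alt, pvCounts_eq]
    have hBg : ¬ (PySem.Dict.size (PySem.Dict.counter l) = l.length ∧ l.length = 5 ∧
        (PySem.List.max? (PySem.Dict.counter l).keys (fun x => x)).getD 0
          = (PySem.List.min? (PySem.Dict.counter l).keys (fun x => x)).getD 0 + 4) :=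
      fun hB => hlen5 ((pvGuardB_iff l hne).mp hB).2.1
    rw [if_neg hBg]
    rw [pvTotal4 l 0, pvTotal3 l]
    split_ifs with h4 <;> omega
  rw [hA]
  exact fun e => hB e.symm
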